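-- pv_equiv track=rewrite | github.com/a-ovchinnikov/plb3 | comp.py | posify
-- ===== SOURCE A (Python) =====
-- def posify(code):
--     memptr = 0
--     out = []
--     for sym in code:
--         if   sym == ">": memptr += 1; out.append(str(memptr))
--         elif sym == "<": memptr -= 1; out.append(str(memptr))
--         elif sym in "+-[].,": out.append(str(memptr))
--         elif sym == "\n": out.append("\n")
--         else: out.append(" ")
--     out = "".join(out)
--     return out, code
-- ===== SOURCE B (Python) =====
-- def posify(code):
--     # Nested-split decomposition: the pointer value is never tracked per character.
--     # Splitting on ">" gives groups separated by +1 moves; splitting each group on "<"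
--     # gives sub-blocks separated by -1 moves; inside a sub-block the pointer is constant,
--     # so each sub-block is rendered wholesale at that constant position.
--     out = []
--     p = 0
--     for gi, group in enumerate(code.split(">")):
--         if gi:
--             p += 1
--             out.append(str(p))
--         for si, sub in enumerate(group.split("<")):
--             if si:
--                 p -= 1
--                 out.append(str(p))
--             out.append("".join(str(p) if c in "+-[].," else "\n" if c == "\n" else " " for c in sub))
--     return "".join(out), code
-- ===== Notes on version B (the rewrite author's own statement) =====
-- stated objective: alternative
-- what changed: Replaces A's single stateful loop (branch chain mutating a pointer per character) with a nested-split decomposition: split the code on '>' and each group on '<', derive the pointer from the split structure (+1 per '>' boundary, -1 per '<' boundary), and render each sub-block wholesale at its constant pointer value.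
import Mathlib
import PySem

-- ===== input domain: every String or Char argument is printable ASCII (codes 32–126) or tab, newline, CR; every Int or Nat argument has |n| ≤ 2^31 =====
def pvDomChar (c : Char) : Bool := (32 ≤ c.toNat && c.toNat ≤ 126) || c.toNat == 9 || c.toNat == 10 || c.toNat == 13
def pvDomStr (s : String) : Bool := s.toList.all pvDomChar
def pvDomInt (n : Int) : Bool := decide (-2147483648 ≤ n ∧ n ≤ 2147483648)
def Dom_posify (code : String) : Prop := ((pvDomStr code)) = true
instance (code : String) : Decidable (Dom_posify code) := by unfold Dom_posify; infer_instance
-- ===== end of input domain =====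

-- B replaces A's per-character pointer-tracking loop by a nested-split decomposition
-- (split on '>' then on '<'; the pointer is constant inside each sub-block) — alternative algorithm, same cost.

-- ===== PORT A =====
-- one loop step of A: update memptr and append the rendered piece
def posifyStepA (st : Int × List String) (sym : Char) : Int × List String :=
  if sym = '>' then (st.1 + 1, st.2 ++ [PySem.Int.toStr (st.1 + 1)])
  else if sym = '<' then (st.1 - 1, st.2 ++ [PySem.Int.toStr (st.1 - 1)])
  else if sym ∈ ['+', '-', '[', ']', '.', ','] then (st.1, st.2 ++ [PySem.Int.toStr st.1])
  else if sym = '\n' then (st.1, st.2 ++ ["\n"])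
  else (st.1, st.2 ++ [" "])

def posify (code : String) : String × String :=
  let r := code.toList.foldl posifyStepA (0, [])
  (PySem.Str.join "" r.2, code)

-- ===== PORT B =====
-- render one character of a sub-block at the (constant) pointer value p
def pvPiece (p : Int) (c : Char) : String :=
  if c ∈ ['+', '-', '[', ']', '.', ','] then PySem.Int.toStr p
  else if c = '\n' then "\n" else " "

-- the inner comprehension: a whole sub-block rendered at pointer p
def pvRenderSub (p : Int) (sub : List Char) : String :=
  PySem.Str.join "" (sub.map (pvPiece p))

-- body of the inner 'for si, sub in enumerate(group.split("<"))' loop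
def pvInnerStep (st : Int × List String) (isub : Int × List Char) : Int × List String :=
  let st' := if isub.1 ≠ 0 then (st.1 - 1, st.2 ++ [PySem.Int.toStr (st.1 - 1)]) else st
  (st'.1, st'.2 ++ [pvRenderSub st'.1 isub.2])

-- body of the outer 'for gi, group in enumerate(code.split(">"))' loop
def pvOuterStep (st : Int × List String) (igrp : Int × List Char) : Int × List String :=
  let st' := if igrp.1 ≠ 0 then (st.1 + 1, st.2 ++ [PySem.Int.toStr (st.1 + 1)]) else st
  (PySem.List.enumerate (PySem.Chars.splitOn igrp.2 ['<'])).foldl pvInnerStep st'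

def posify_alt (code : String) : String × String :=
  let r := (PySem.List.enumerate (PySem.Chars.splitOn code.toList ['>'])).foldl pvOuterStep (0, [])
  (PySem.Str.join "" r.2, code)

-- ===== PRECONDITION & SPEC =====
def Spec_posify (code : String) (out : String × String) : Prop := out = posify_alt code
instance (code : String) (out : String × String) : Decidable (Spec_posify code out) := by unfold Spec_posify; infer_instance

-- ===== CLAIM (what is proved, stated in full; the proofs are below) =====
def Claim_equal_posify : Prop := ∀ (code : String), Dom_posify code → Spec_posify code (posify code)

-- ===== LEMMAS AND PROOFS =====

-- the per-character pointer delta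
def pvDelta (c : Char) : Int := if c = '>' then 1 else if c = '<' then -1 else 0

def pvDsum (l : List Char) : Int := (l.map pvDelta).sum

-- what A renders for one character, given the pointer value AFTER that character
def pvRender1 (c : Char) (q : Int) : String :=
  if c ∈ ['+', '-', '[', ']', '.', ',', '<', '>'] then PySem.Int.toStr q
  else if c = '\n' then "\n" else " "

-- the canonical per-character emission A produces, starting at pointer p
def pvEmit : List Char → Int → List String
  | [], _ => []
  | c :: cs, p => pvRender1 c (p + pvDelta c) :: pvEmit cs (p + pvDelta c)

-- simple recursive characterisation of splitting on a single character
def pvSplit (c : Char) : List Char → List (List Char)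
  | [] => [[]]
  | a :: t =>
      match pvSplit c t with
      | [] => [[a]]
      | h :: r => if a = c then [] :: h :: r else (a :: h) :: r

-- glue pieces back with separator c
def pvRecon (c : Char) : List (List Char) → List Char
  | [] => []
  | [s] => s
  | s :: r => s ++ c :: pvRecon c r

-- pointer after processing a group whose sub-split is subs
def pvAfter (subs : List (List Char)) (p : Int) : Int := p - subs.length + 1

-- strings emitted for the tail sub-blocks (each preceded by its '<' boundary)
def pvInnerTail : List (List Char) → Int → List String
  | [], _ => []
  | s :: r, p => PySem.Int.toStr (p - 1) :: pvRenderSub (p - 1) s :: pvInnerTail r (p - 1)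

-- strings emitted for a whole group given its sub-split
def pvInnerAll (subs : List (List Char)) (p : Int) : List String :=
  match subs with
  | [] => []
  | s :: r => pvRenderSub p s :: pvInnerTail r p

-- strings emitted for the tail groups (each preceded by its '>' boundary)
def pvOuterTail : List (List Char) → Int → List String
  | [], _ => []
  | g :: r, q =>
      PySem.Int.toStr (q + 1) :: (pvInnerAll (pvSplit '<' g) (q + 1) ++
        pvOuterTail r (pvAfter (pvSplit '<' g) (q + 1)))

-- strings emitted for all groups
def pvOuterAll (groups : List (List Char)) (p : Int) : List String :=
  match groups with
  | [] => []
  | g :: r => pvInnerAll (pvSplit '<' g) p ++ pvOuterTail r (pvAfter (pvSplit '<' g) p)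

def pvFlat (xs : List String) : List Char := (xs.map String.toList).flatten

-- ---------- side A ----------

lemma pvStepA_eq (p : Int) (acc : List String) (c : Char) :
    posifyStepA (p, acc) c = (p + pvDelta c, acc ++ [pvRender1 c (p + pvDelta c)]) := by
  by_cases h1 : c = '>'
  · subst h1; simp [posifyStepA, pvRender1, pvDelta]
  · by_cases h2 : c = '<'
    · subst h2; simp [posifyStepA, pvRender1, pvDelta, sub_eq_add_neg]
    · by_cases h3 : c ∈ ['+', '-', '[', ']', '.', ',']
      · have hm : c ∈ ['+', '-', '[', ']', '.', ',', '<', '>'] := by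
          simp only [List.mem_cons] at h3 ⊢; tauto
        simp [posifyStepA, pvRender1, pvDelta, h1, h2, h3, hm]
      · have hm : c ∉ ['+', '-', '[', ']', '.', ',', '<', '>'] := by
          simp only [List.mem_cons] at h3 ⊢; tauto
        by_cases h4 : c = '\n'
        · simp [posifyStepA, pvRender1, pvDelta, h4, hm]
        · simp [posifyStepA, pvRender1, pvDelta, h1, h2, h3, hm, h4]

lemma pvFoldA (l : List Char) : ∀ (p : Int) (acc : List String),
    l.foldl posifyStepA (p, acc) = (p + pvDsum l, acc ++ pvEmit l p) := by
  induction l with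
  | nil => intro p acc; simp [pvEmit, pvDsum]
  | cons c cs ih =>
      intro p acc
      simp only [List.foldl_cons, pvStepA_eq, ih, pvEmit, pvDsum, List.map_cons, List.sum_cons]
      simp [add_assoc]

-- ---------- pvSplit facts ----------

lemma pvSplit_ne_nil (c : Char) (l : List Char) : pvSplit c l ≠ [] := by
  induction l with
  | nil => simp [pvSplit]
  | cons a t ih =>
      simp only [pvSplit]
      cases h : pvSplit c t with
      | nil => simp
      | cons h' r => split_ifs <;> simp

lemma pvSplit_cons (c a : Char) (t : List Char) {h' : List Char} {r : List (List Char)}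
    (h : pvSplit c t = h' :: r) :
    pvSplit c (a :: t) = if a = c then [] :: h' :: r else (a :: h') :: r := by
  simp [pvSplit, h]

lemma pvSplitOn_go (c : Char) : ∀ (fuel : Nat) (l cur : List Char) (acc : List (List Char)),
    l.length ≤ fuel →
    PySem.Chars.splitOn.go [c] fuel l cur acc =
      acc.reverse ++ (match pvSplit c l with
        | [] => []
        | h :: r => (cur.reverse ++ h) :: r) := by
  intro fuel
  induction fuel with
  | zero =>
      intro l cur acc hl
      have : l = [] := by cases l <;> simp_all
      subst this
      simp [PySem.Chars.splitOn.go, pvSplit]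
  | succ fuel ih =>
      intro l cur acc hl
      cases l with
      | nil => simp [PySem.Chars.splitOn.go, pvSplit]
      | cons a rest =>
          have hrest : rest.length ≤ fuel := by simp at hl; omega
          by_cases hac : a = c
          · subst hac
            have hpre : List.isPrefixOf [a] (a :: rest) = true := by
              simp [List.isPrefixOf]
            rw [PySem.Chars.splitOn.go]
            simp only [hpre, if_true, List.length_cons, List.length_nil, List.drop_succ_cons,
              List.drop_zero]
            rw [ih rest [] (List.reverse cur :: acc) (by simpa using hrest)]
            cases h : pvSplit a rest with
            | nil => exact absurd h (pvSplit_ne_nil a rest)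
            | cons h' r =>
                simp [pvSplit, h]
          · have hpre : List.isPrefixOf [c] (a :: rest) = false := by
              simp [List.isPrefixOf]; exact fun h => absurd h.symm hac
            rw [PySem.Chars.splitOn.go]
            simp only [hpre]
            rw [if_neg (by simp [hpre])]
            rw [ih rest (a :: cur) acc hrest]
            cases h : pvSplit c rest with
            | nil => exact absurd h (pvSplit_ne_nil c rest)
            | cons h' r =>
                simp [pvSplit, h, hac]

lemma pvSplitOn_eq (c : Char) (l : List Char) :
    PySem.Chars.splitOn l [c] = pvSplit c l := by
  rw [PySem.Chars.splitOn, pvSplitOn_go c (l.length + 1) l [] [] (by omega)]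
  cases h : pvSplit c l with
  | nil => exact absurd h (pvSplit_ne_nil c l)
  | cons h' r => simp

lemma pvRecon_single (c : Char) (s : List Char) : pvRecon c [s] = s := rfl
lemma pvRecon_cons2 (c : Char) (s x : List Char) (r : List (List Char)) :
    pvRecon c (s :: x :: r) = s ++ c :: pvRecon c (x :: r) := rfl

lemma pvRecon_pvSplit (c : Char) (l : List Char) : pvRecon c (pvSplit c l) = l := by
  induction l with
  | nil => simp [pvSplit, pvRecon]
  | cons a t ih =>
      cases h : pvSplit c t with
      | nil => exact absurd h (pvSplit_ne_nil c t)
      | cons h' r =>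
          rw [h] at ih
          rw [pvSplit_cons c a t h]
          by_cases hac : a = c
          · subst hac
            rw [if_pos rfl, pvRecon_cons2, ih]
            simp
          · rw [if_neg hac]
            cases r with
            | nil => rw [pvRecon_single] at ih; rw [pvRecon_single, ih]
            | cons r0 rr => rw [pvRecon_cons2] at ih ⊢; simp [ih]

lemma pvSplit_mem_subset (c : Char) (l : List Char) :
    ∀ s ∈ pvSplit c l, ∀ x ∈ s, x ∈ l := by
  induction l with
  | nil => intro s hs; simp [pvSplit] at hs; subst hs; simp
  | cons a t ih =>
      intro s hs x hx
      cases h : pvSplit c t with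
      | nil => exact absurd h (pvSplit_ne_nil c t)
      | cons h' r =>
          rw [pvSplit_cons c a t h] at hs
          rw [h] at ih
          by_cases hac : a = c
          · rw [if_pos hac] at hs
            simp only [List.mem_cons] at hs
            rcases hs with hs | hs | hs
            · subst hs; simp at hx
            · exact List.mem_cons_of_mem a (ih h' (by simp) x (hs ▸ hx))
            · exact List.mem_cons_of_mem a (ih s (by simp [hs]) x hx)
          · rw [if_neg hac] at hs
            simp only [List.mem_cons] at hs
            rcases hs with hs | hs
            · subst hs
              simp only [List.mem_cons] at hx
              rcases hx with rfl | hx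
              · simp
              · exact List.mem_cons_of_mem a (ih h' (by simp) x hx)
            · exact List.mem_cons_of_mem a (ih s (by simp [hs]) x hx)

lemma pvSplit_clean (c : Char) (l : List Char) : ∀ s ∈ pvSplit c l, c ∉ s := by
  induction l with
  | nil => intro s hs; simp [pvSplit] at hs; subst hs; simp
  | cons a t ih =>
      intro s hs
      cases h : pvSplit c t with
      | nil => exact absurd h (pvSplit_ne_nil c t)
      | cons h' r =>
          rw [pvSplit_cons c a t h] at hs
          rw [h] at ih
          by_cases hac : a = c
          · rw [if_pos hac] at hs
            simp only [List.mem_cons] at hs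
            rcases hs with hs | hs | hs
            · subst hs; simp
            · exact hs ▸ ih h' (by simp)
            · exact ih s (by simp [hs])
          · rw [if_neg hac] at hs
            simp only [List.mem_cons] at hs
            rcases hs with hs | hs
            · subst hs
              intro hc
              simp only [List.mem_cons] at hc
              rcases hc with rfl | hc
              · exact hac rfl
              · exact ih h' (by simp) hc
            · exact ih s (by simp [hs])

-- ---------- pvEmit facts ----------

lemma pvEmit_append (l1 l2 : List Char) : ∀ p : Int,
    pvEmit (l1 ++ l2) p = pvEmit l1 p ++ pvEmit l2 (p + pvDsum l1) := by
  induction l1 with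
  | nil => intro p; simp [pvEmit, pvDsum]
  | cons c cs ih =>
      intro p
      simp only [List.cons_append, pvEmit, ih, pvDsum, List.map_cons, List.sum_cons]
      simp [add_assoc]

lemma pvDelta_zero {c : Char} (h1 : c ≠ '<') (h2 : c ≠ '>') : pvDelta c = 0 := by
  simp [pvDelta, h1, h2]

lemma pvDsum_zero {s : List Char} (h1 : '<' ∉ s) (h2 : '>' ∉ s) : pvDsum s = 0 := by
  induction s with
  | nil => simp [pvDsum]
  | cons a t ih =>
      simp only [List.mem_cons, not_or] at h1 h2
      simp only [pvDsum, List.map_cons, List.sum_cons] at ih ⊢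
      rw [pvDelta_zero (fun h => h1.1 h.symm) (fun h => h2.1 h.symm)]
      rw [ih h1.2 h2.2]
      ring

lemma pvEmit_clean {s : List Char} (h1 : '<' ∉ s) (h2 : '>' ∉ s) (p : Int) :
    pvEmit s p = s.map (pvPiece p) := by
  induction s with
  | nil => simp [pvEmit]
  | cons a t ih =>
      simp only [List.mem_cons, not_or] at h1 h2
      have ha1 : a ≠ '<' := fun h => h1.1 h.symm
      have ha2 : a ≠ '>' := fun h => h2.1 h.symm
      simp only [pvEmit, List.map_cons]
      rw [pvDelta_zero ha1 ha2, add_zero, ih h1.2 h2.2]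
      congr 1
      simp only [pvRender1, pvPiece, List.mem_cons]
      by_cases h3 : a ∈ ['+', '-', '[', ']', '.', ',']
      · simp only [List.mem_cons] at h3
        have : a = '+' ∨ a = '-' ∨ a = '[' ∨ a = ']' ∨ a = '.' ∨ a = ',' := by simpa using h3
        rcases this with h|h|h|h|h|h <;> simp [h]
      · simp only [List.mem_cons] at h3
        have hnot : ¬(a = '+' ∨ a = '-' ∨ a = '[' ∨ a = ']' ∨ a = '.' ∨ a = ',' ∨ a = '<' ∨ a = '>') := by
          push_neg
          have := (by simpa using h3 : ¬(a = '+' ∨ a = '-' ∨ a = '[' ∨ a = ']' ∨ a = '.' ∨ a = ','))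
          push_neg at this
          exact ⟨this.1, this.2.1, this.2.2.1, this.2.2.2.1, this.2.2.2.2.1, this.2.2.2.2.2, ha1, ha2⟩
        have hnot6 : ¬(a = '+' ∨ a = '-' ∨ a = '[' ∨ a = ']' ∨ a = '.' ∨ a = ',') := by tauto
        simp [hnot, hnot6]

lemma pvDsum_group {g : List Char} (h : '>' ∉ g) :
    pvDsum g = 1 - (pvSplit '<' g).length := by
  induction g with
  | nil => simp [pvDsum, pvSplit]
  | cons a t ih =>
      simp only [List.mem_cons, not_or] at h
      have iht := ih h.2
      simp only [pvDsum, List.map_cons, List.sum_cons] at iht ⊢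
      cases hs : pvSplit '<' t with
      | nil => exact absurd hs (pvSplit_ne_nil '<' t)
      | cons h' r =>
          rw [pvSplit_cons '<' a t hs]
          rw [hs] at iht
          by_cases hac : a = '<'
          · subst hac
            rw [if_pos rfl, pvDelta, if_neg (by decide), if_pos rfl, iht]
            simp only [List.length_cons]
            push_cast
            ring
          · have ha2 : a ≠ '>' := fun hh => h.1 hh.symm
            rw [if_neg hac, pvDelta_zero hac ha2, iht]
            simp

-- ---------- fold lemmas for B ----------

lemma pvEnumerate_cons {α : Type} (x : α) (t : List α) (i : Int) :
    PySem.List.enumerate (x :: t) i = (i, x) :: PySem.List.enumerate t (i + 1) := by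
  simp [PySem.List.enumerate]

lemma pvInnerFold (rest : List (List Char)) : ∀ (i p : Int) (out : List String), 1 ≤ i →
    (PySem.List.enumerate rest i).foldl pvInnerStep (p, out) =
      (p - rest.length, out ++ pvInnerTail rest p) := by
  induction rest with
  | nil => intro i p out _; simp [PySem.List.enumerate, pvInnerTail]
  | cons s r ih =>
      intro i p out hi
      rw [pvEnumerate_cons, List.foldl_cons]
      have hne : i ≠ 0 := by omega
      have hstep : pvInnerStep (p, out) (i, s) =
          (p - 1, out ++ [PySem.Int.toStr (p - 1), pvRenderSub (p - 1) s]) := by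
        simp [pvInnerStep, hne]
      rw [hstep, ih (i + 1) (p - 1) _ (by omega)]
      simp only [pvInnerTail, List.length_cons, Prod.mk.injEq]
      constructor
      · push_cast; ring
      · simp

lemma pvGroupFold (g : List Char) (st : Int × List String) :
    (PySem.List.enumerate (PySem.Chars.splitOn g ['<'])).foldl pvInnerStep st =
      (pvAfter (pvSplit '<' g) st.1, st.2 ++ pvInnerAll (pvSplit '<' g) st.1) := by
  rw [pvSplitOn_eq]
  cases h : pvSplit '<' g with
  | nil => exact absurd h (pvSplit_ne_nil '<' g)
  | cons s r =>
      rw [pvEnumerate_cons, List.foldl_cons]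
      have hstep : pvInnerStep st (0, s) = (st.1, st.2 ++ [pvRenderSub st.1 s]) := by
        simp [pvInnerStep]
      rw [hstep]
      simp only [zero_add]
      rw [pvInnerFold r 1 st.1 _ (by omega)]
      simp only [pvInnerAll, pvAfter, List.length_cons, Prod.mk.injEq]
      constructor
      · push_cast; ring
      · simp

lemma pvOuterFold (groups : List (List Char)) : ∀ (i p : Int) (out : List String), 1 ≤ i →
    ∃ pf, (PySem.List.enumerate groups i).foldl pvOuterStep (p, out) =
      (pf, out ++ pvOuterTail groups p) := by
  induction groups with
  | nil => intro i p out _; exact ⟨p, by simp [PySem.List.enumerate, pvOuterTail]⟩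
  | cons g r ih =>
      intro i p out hi
      rw [pvEnumerate_cons, List.foldl_cons]
      have hne : i ≠ 0 := by omega
      have hstep : pvOuterStep (p, out) (i, g) =
          (pvAfter (pvSplit '<' g) (p + 1),
            (out ++ [PySem.Int.toStr (p + 1)]) ++ pvInnerAll (pvSplit '<' g) (p + 1)) := by
        simp only [pvOuterStep, hne, ne_eq, not_true_eq_false, if_true]
        rw [pvGroupFold]
        simp [hne]
      rw [hstep]
      obtain ⟨pf, hpf⟩ := ih (i + 1) (pvAfter (pvSplit '<' g) (p + 1)) _ (by omega)
      refine ⟨pf, ?_⟩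
      rw [hpf]
      simp [pvOuterTail]

-- ---------- semantic equality ----------

lemma pvFlat_append (xs ys : List String) : pvFlat (xs ++ ys) = pvFlat xs ++ pvFlat ys := by
  simp [pvFlat]

lemma pvJoin_eps (pss : List (List Char)) : PySem.Chars.join [] pss = pss.flatten := by
  rw [PySem.Chars.join]
  induction pss with
  | nil => simp [List.intercalate]
  | cons h t ih =>
      cases t with
      | nil => simp [List.intercalate]
      | cons a b =>
          simp only [List.intercalate] at ih ⊢
          simp [List.intersperse] at ih ⊢
          exact ih

lemma pvJoin_toList (xs : List String) : (PySem.Str.join "" xs).toList = pvFlat xs := by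
  rw [PySem.Str.toList_join]
  show PySem.Chars.join [] (xs.map String.toList) = _
  rw [pvJoin_eps]
  rfl

lemma pvInner_sem (subs : List (List Char)) : ∀ p : Int,
    (∀ s ∈ subs, '<' ∉ s ∧ '>' ∉ s) →
    pvFlat (pvEmit (pvRecon '<' subs) p) = pvFlat (pvInnerAll subs p) := by
  induction subs with
  | nil => intro p _; simp [pvRecon, pvEmit, pvInnerAll]
  | cons s r ih =>
      intro p hcl
      have hs := hcl s (by simp)
      cases r with
      | nil =>
          simp only [pvRecon, pvInnerAll, pvInnerTail]
          rw [pvEmit_clean hs.1 hs.2]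
          simp [pvFlat, pvRenderSub, pvJoin_toList, pvJoin_eps, PySem.Str.toList_join]
      | cons s2 rr =>
          have hrecon : pvRecon '<' (s :: s2 :: rr) = s ++ '<' :: pvRecon '<' (s2 :: rr) := rfl
          rw [hrecon]
          have : pvEmit (s ++ '<' :: pvRecon '<' (s2 :: rr)) p =
              pvEmit s p ++ pvEmit ('<' :: pvRecon '<' (s2 :: rr)) (p + pvDsum s) := pvEmit_append _ _ p
          rw [this, pvDsum_zero hs.1 hs.2, add_zero]
          have hemitlt : pvEmit ('<' :: pvRecon '<' (s2 :: rr)) p =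
              PySem.Int.toStr (p - 1) :: pvEmit (pvRecon '<' (s2 :: rr)) (p - 1) := by
            simp [pvEmit, pvDelta, pvRender1, sub_eq_add_neg]
          rw [hemitlt]
          have ihr := ih (p - 1) (fun x hx => hcl x (List.mem_cons_of_mem s hx))
          have hinner : pvInnerAll (s :: s2 :: rr) p =
              pvRenderSub p s :: PySem.Int.toStr (p - 1) :: pvInnerAll (s2 :: rr) (p - 1) := rfl
          rw [hinner]
          rw [pvEmit_clean hs.1 hs.2]
          show pvFlat ((s.map (pvPiece p)) ++ (PySem.Int.toStr (p-1) :: pvEmit (pvRecon '<' (s2 :: rr)) (p - 1))) = _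
          rw [pvFlat_append]
          have h1 : pvFlat (s.map (pvPiece p)) = pvFlat [pvRenderSub p s] := by
            simp [pvFlat, pvRenderSub, pvJoin_toList, pvJoin_eps, PySem.Str.toList_join]
          have h2 : pvFlat (PySem.Int.toStr (p-1) :: pvEmit (pvRecon '<' (s2 :: rr)) (p - 1)) =
              (PySem.Int.toStr (p-1)).toList ++ pvFlat (pvEmit (pvRecon '<' (s2 :: rr)) (p - 1)) := by
            simp [pvFlat]
          have h3 : pvFlat (pvRenderSub p s :: PySem.Int.toStr (p - 1) :: pvInnerAll (s2 :: rr) (p - 1)) =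
              pvFlat [pvRenderSub p s] ++ (PySem.Int.toStr (p-1)).toList ++ pvFlat (pvInnerAll (s2 :: rr) (p - 1)) := by
            simp [pvFlat]
          rw [h2, h3, h1, ihr]
          simp [List.append_assoc]

lemma pvOuter_sem (groups : List (List Char)) : ∀ p : Int,
    (∀ g ∈ groups, '>' ∉ g) →
    pvFlat (pvEmit (pvRecon '>' groups) p) = pvFlat (pvOuterAll groups p) := by
  induction groups with
  | nil => intro p _; simp [pvRecon, pvEmit, pvOuterAll]
  | cons g r ih =>
      intro p hcl
      have hg : '>' ∉ g := hcl g (by simp)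
      have hsubclean : ∀ s ∈ pvSplit '<' g, '<' ∉ s ∧ '>' ∉ s := by
        intro s hs
        refine ⟨pvSplit_clean '<' g s hs, fun hx => hg ?_⟩
        exact pvSplit_mem_subset '<' g s hs '>' hx
      have hinner : pvFlat (pvEmit g p) = pvFlat (pvInnerAll (pvSplit '<' g) p) := by
        have := pvInner_sem (pvSplit '<' g) p hsubclean
        rwa [pvRecon_pvSplit] at this
      cases r with
      | nil =>
          simp only [pvRecon, pvOuterAll, pvOuterTail]
          rw [List.append_nil]
          exact hinner
      | cons g2 rr =>
          have hrecon : pvRecon '>' (g :: g2 :: rr) = g ++ '>' :: pvRecon '>' (g2 :: rr) := rfl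
          rw [hrecon, pvEmit_append]
          have hq : p + pvDsum g = pvAfter (pvSplit '<' g) p := by
            rw [pvDsum_group hg, pvAfter]; ring
          rw [hq]
          set q := pvAfter (pvSplit '<' g) p with hqdef
          have hemitgt : pvEmit ('>' :: pvRecon '>' (g2 :: rr)) q =
              PySem.Int.toStr (q + 1) :: pvEmit (pvRecon '>' (g2 :: rr)) (q + 1) := by
            simp [pvEmit, pvDelta, pvRender1]
          rw [hemitgt]
          have ihr := ih (q + 1) (fun x hx => hcl x (List.mem_cons_of_mem g hx))
          have houter : pvOuterAll (g :: g2 :: rr) p =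
              pvInnerAll (pvSplit '<' g) p ++ (PySem.Int.toStr (q + 1) :: pvOuterAll (g2 :: rr) (q + 1)) := by
            simp only [pvOuterAll, pvOuterTail, ← hqdef]
          rw [houter, pvFlat_append, pvFlat_append, hinner]
          have h2 : ∀ (x : String) (ys : List String), pvFlat (x :: ys) = x.toList ++ pvFlat ys := by
            intro x ys; simp [pvFlat]
          rw [h2, h2, ihr]

-- ===== VERDICT (by name: the statement is the Claim_ definition above) =====
theorem posify_spec : Claim_equal_posify := by
  intro code _
  show posify code = posify_alt code
  have hA : posify code = (PySem.Str.join "" (pvEmit code.toList 0), code) := by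
    simp [posify, pvFoldA]
  have hB : posify_alt code =
      (PySem.Str.join "" (pvOuterAll (pvSplit '>' code.toList) 0), code) := by
    show (PySem.Str.join ""
        ((PySem.List.enumerate (PySem.Chars.splitOn code.toList ['>'])).foldl pvOuterStep (0, [])).2,
      code) = _
    rw [pvSplitOn_eq]
    cases h : pvSplit '>' code.toList with
    | nil => exact absurd h (pvSplit_ne_nil '>' code.toList)
    | cons g r =>
        rw [pvEnumerate_cons, List.foldl_cons]
        have hstep : pvOuterStep (0, ([] : List String)) (0, g) =
            (pvAfter (pvSplit '<' g) 0, pvInnerAll (pvSplit '<' g) 0) := by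
          simp only [pvOuterStep, ne_eq, not_true_eq_false]
          rw [if_neg (by simp)]
          rw [pvGroupFold]
          simp
        rw [hstep]
        simp only [zero_add]
        obtain ⟨pf, hpf⟩ := pvOuterFold r 1 (pvAfter (pvSplit '<' g) 0) (pvInnerAll (pvSplit '<' g) 0) (by omega)
        rw [hpf]
        simp [pvOuterAll]
  rw [hA, hB]
  have hclean : ∀ g ∈ pvSplit '>' code.toList, '>' ∉ g := pvSplit_clean '>' code.toList
  have hsem := pvOuter_sem (pvSplit '>' code.toList) 0 hclean
  rw [pvRecon_pvSplit] at hsem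
  have : PySem.Str.join "" (pvEmit code.toList 0) =
      PySem.Str.join "" (pvOuterAll (pvSplit '>' code.toList) 0) := by
    apply String.toList_inj.mp
    rw [pvJoin_toList, pvJoin_toList]
    exact hsem
  rw [this]
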